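-- pv_equiv track=rewrite | github.com/TheOneTheyCallEnos/TABERNACLE-review | scripts/mediaos/davis_review.py | analyze_contact_direction
-- ===== SOURCE A (Python) =====
-- def analyze_contact_direction(activity: list) -> str:
--     """
--     Analyze the activity feed to determine last contact direction.
--
--     Returns:
--     - "inbound" if customer reached out
--     - "outbound" if we reached out
--     - "ghosted" if multiple outbound with no response
--     - "unknown" if can't determine
--     """
--     if not activity:
--         return "unknown"
--
--     # Count recent outbound attempts
--     outbound_count = 0
--     has_inbound = False
--
--     for item in activity[:5]:  # Check last 5 activities
--         desc = item.get("description", "").lower()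
--         activity_type = item.get("type", "").lower()
--
--         # Outbound indicators
--         if activity_type in ["call", "email"] and any(x in desc for x in ["called", "emailed", "na ", "lvm", "no answer", "voicemail"]):
--             outbound_count += 1
--
--         # Inbound indicators
--         if any(x in desc for x in ["received", "inbound", "they called", "replied", "responded"]):
--             has_inbound = True
--             break
--
--     if has_inbound:
--         return "inbound"
--     elif outbound_count >= 3:
--         return "ghosted"
--     elif outbound_count > 0:
--         return "outbound"
--
--     return "unknown"
-- ===== SOURCE B (Python) =====
-- INBOUND_WORDS = ["received", "inbound", "they called", "replied", "responded"]
-- OUTBOUND_WORDS = ["called", "emailed", "na ", "lvm", "no answer", "voicemail"]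
--
--
-- def _tag(item):
--     """Classify one activity item as 'I' (inbound), 'O' (outbound) or '-'."""
--     desc = item.get("description", "").lower()
--     if any(w in desc for w in INBOUND_WORDS):
--         return "I"
--     if item.get("type", "").lower() in ("call", "email") and any(w in desc for w in OUTBOUND_WORDS):
--         return "O"
--     return "-"
--
--
-- def analyze_contact_direction(activity: list) -> str:
--     """Map the recent items to tags, then classify the tag list by table lookup.
--
--     An inbound tag dominates every other outcome; otherwise the (capped)
--     outbound tag count indexes directly into the result table. The empty feed
--     falls out as count 0 -> 'unknown', so no separate guard is needed.
--     """
--     tags = [_tag(item) for item in activity[:5]]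
--     if "I" in tags:
--         return "inbound"
--     return ["unknown", "outbound", "outbound", "ghosted"][min(tags.count("O"), 3)]
-- ===== Notes on version B (the rewrite author's own statement) =====
-- stated objective: simpler
-- what changed: Replaces A's interleaved counter/flag/break loop and if/elif threshold chain by a map-to-tags pipeline: each recent item is reduced to a single tag 'I'/'O'/'-' with inbound precedence, then the result is an 'I' membership test plus a table lookup indexed by the capped 'O' count; the empty-feed guard disappears because count 0 already yields 'unknown'.
import Mathlib
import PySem

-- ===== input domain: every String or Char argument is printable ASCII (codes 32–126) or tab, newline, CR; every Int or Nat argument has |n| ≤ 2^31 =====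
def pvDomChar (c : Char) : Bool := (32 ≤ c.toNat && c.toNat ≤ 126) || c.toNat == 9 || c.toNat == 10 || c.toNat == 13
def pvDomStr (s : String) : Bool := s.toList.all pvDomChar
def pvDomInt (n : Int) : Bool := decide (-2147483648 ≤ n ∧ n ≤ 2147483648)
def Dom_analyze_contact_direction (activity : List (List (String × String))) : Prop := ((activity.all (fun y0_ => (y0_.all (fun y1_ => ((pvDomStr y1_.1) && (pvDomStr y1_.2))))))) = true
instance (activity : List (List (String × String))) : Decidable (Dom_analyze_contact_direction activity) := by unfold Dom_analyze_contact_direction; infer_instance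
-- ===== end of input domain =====

-- ===== PORT A =====
-- Header: B replaces A's interleaved counter/flag/break loop and threshold chain by a
-- map-to-tags pipeline with a table lookup (objective: simpler); same return value, no side effects.
def pvInbHit (item : List (String × String)) : Bool :=
  (["received", "inbound", "they called", "replied", "responded"] : List String).any
    (fun x => PySem.Str.isIn x (PySem.Str.lower (PySem.Dict.getD ⟨item⟩ "description" "")))

def pvOutHit (item : List (String × String)) : Bool :=
  (["call", "email"] : List String).contains (PySem.Str.lower (PySem.Dict.getD ⟨item⟩ "type" ""))
    && (["called", "emailed", "na ", "lvm", "no answer", "voicemail"] : List String).any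
         (fun x => PySem.Str.isIn x (PySem.Str.lower (PySem.Dict.getD ⟨item⟩ "description" "")))

-- A's loop: running outbound count, inbound flag, early break on an inbound hit
def pvLoopA : List (List (String × String)) → Int → Int × Bool
  | [], cnt => (cnt, false)
  | item :: rest, cnt =>
    let cnt' := if pvOutHit item then cnt + 1 else cnt
    if pvInbHit item then (cnt', true) else pvLoopA rest cnt'

def analyze_contact_direction (activity : List (List (String × String))) : String :=
  if activity = [] then "unknown"
  else
    let r := pvLoopA (PySem.List.slice activity none (some 5)) 0
    if r.2 then "inbound"
    else if r.1 ≥ 3 then "ghosted"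
    else if r.1 > 0 then "outbound"
    else "unknown"

-- ===== PORT B =====
-- Source B's _tag: one tag per item, inbound precedence
def pvTag (item : List (String × String)) : String :=
  let desc := PySem.Str.lower (PySem.Dict.getD ⟨item⟩ "description" "")
  if (["received", "inbound", "they called", "replied", "responded"] : List String).any
       (fun w => PySem.Str.isIn w desc) then "I"
  else if (["call", "email"] : List String).contains
            (PySem.Str.lower (PySem.Dict.getD ⟨item⟩ "type" ""))
          && (["called", "emailed", "na ", "lvm", "no answer", "voicemail"] : List String).any
               (fun w => PySem.Str.isIn w desc) then "O"
  else "-"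

def analyze_contact_direction_alt (activity : List (List (String × String))) : String :=
  let tags := (PySem.List.slice activity none (some 5)).map pvTag
  if tags.contains "I" then "inbound"
  else
    -- table[min(tags.count('O'), 3)]: the index is provably in [0,3], so the default is unreachable
    PySem.List.pyGetD (["unknown", "outbound", "outbound", "ghosted"] : List String)
      (min ((PySem.List.count tags "O" : Nat) : Int) 3) "unknown"

-- ===== PRECONDITION & SPEC =====
def Spec_analyze_contact_direction (activity : List (List (String × String))) (out : String) : Prop := out = analyze_contact_direction_alt activity
instance (activity : List (List (String × String))) (out : String) : Decidable (Spec_analyze_contact_direction activity out) := by unfold Spec_analyze_contact_direction; infer_instance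

-- ===== CLAIM (what is proved, stated in full; the proofs are below) =====
def Claim_equal_analyze_contact_direction : Prop := ∀ (activity : List (List (String × String))), Dom_analyze_contact_direction activity → Spec_analyze_contact_direction activity (analyze_contact_direction activity)

-- ===== LEMMAS AND PROOFS =====
theorem pvTag_eq_I (item : List (String × String)) : (pvTag item == "I") = pvInbHit item := by
  simp only [pvTag, pvInbHit]
  split_ifs with h1 h2 <;> simp_all

theorem pvTag_O_iff (item : List (String × String)) (h : pvInbHit item = false) :
    pvTag item = "O" ↔ pvOutHit item = true := by
  simp only [pvTag, pvInbHit] at h ⊢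
  split_ifs with h1 h2 <;> simp_all [pvOutHit]

theorem contains_tags_I (l : List (List (String × String))) :
    (l.map pvTag).contains "I" = l.any pvInbHit := by
  rw [List.contains_eq_any_beq, List.any_map]
  have h : ((fun x => "I" == x) ∘ pvTag) = pvInbHit := by
    funext item; simpa [BEq.comm] using pvTag_eq_I item
  rw [h]

theorem count_tags_O (l : List (List (String × String))) (h : l.any pvInbHit = false) :
    PySem.List.count (l.map pvTag) "O" = l.countP pvOutHit := by
  rw [PySem.List.count_eq, List.count_eq_countP, List.countP_map]
  refine List.countP_congr ?_
  intro item hm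
  have hf : pvInbHit item = false := by
    simpa using List.any_eq_false.mp h item hm
  simpa using pvTag_O_iff item hf

theorem pvLoopA_snd (l : List (List (String × String))) (cnt : Int) :
    (pvLoopA l cnt).2 = l.any pvInbHit := by
  induction l generalizing cnt with
  | nil => simp [pvLoopA]
  | cons item rest ih =>
    simp only [pvLoopA, List.any_cons]
    by_cases h : pvInbHit item = true <;> simp [h, ih]

theorem pvLoopA_fst (l : List (List (String × String))) (cnt : Int)
    (h : l.any pvInbHit = false) :
    (pvLoopA l cnt).1 = cnt + (l.countP pvOutHit : Int) := by
  induction l generalizing cnt with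
  | nil => simp [pvLoopA]
  | cons item rest ih =>
    simp only [List.any_cons, Bool.or_eq_false_iff] at h
    simp only [pvLoopA, h.1, List.countP_cons]
    by_cases ho : pvOutHit item = true <;>
      · simp [ho, ih _ h.2]; try ring

-- ===== VERDICT (by name: the statement is the Claim_ definition above) =====
theorem analyze_contact_direction_spec : Claim_equal_analyze_contact_direction := by
  intro activity _
  unfold Spec_analyze_contact_direction analyze_contact_direction analyze_contact_direction_alt
  by_cases he : activity = []
  · subst he; rfl
  · rw [if_neg he]
    set recent := PySem.List.slice activity none (some 5) with hr
    simp only [contains_tags_I]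
    by_cases hin : recent.any pvInbHit = true
    · simp [pvLoopA_snd, hin]
    · simp only [Bool.not_eq_true] at hin
      simp only [pvLoopA_snd, hin, Bool.false_eq_true, if_false]
      rw [pvLoopA_fst recent 0 hin, count_tags_O recent hin]
      set c := recent.countP pvOutHit with hc
      rcases Nat.lt_or_ge c 3 with hlt | hge
      · interval_cases c <;> simp [PySem.List.pyGetD]
      · have hm : min ((c : Nat) : Int) 3 = 3 := by omega
        rw [hm, if_pos (by omega : (0 : Int) + (c : Int) ≥ 3)]
        rfl
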